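-- pv_equiv track=rewrite | github.com/sb224sc-HT22-VT27/y3-lnu | 2dt905/computation/odd_parity.py | compute_column_parity
-- ===== SOURCE A (Python) =====
-- def compute_column_parity(matrix):
--     # Transpose the matrix to get columns as rows
--     transposed_matrix = ["".join(row[i] for row in matrix) for i in range(len(matrix[0]))]
--
--     column_parity_results = []
--
--     for column in transposed_matrix:
--         # Count the number of 1s in the binary string
--         count_of_ones = column.count('1')
--
--         # Check odd or even parity
--         parity = 1 if count_of_ones % 2 == 0 else 0
--
--         # Append parity to the result list
--         column_parity_results.append(parity)
--
--     return column_parity_results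
-- ===== SOURCE B (Python) =====
-- def compute_column_parity(matrix):
--     # Row-major accumulating pass: keep a running parity per column, no transpose.
--     n = len(matrix[0])
--     parities = [0] * n
--     for row in matrix:
--         parities = [p ^ (1 if row[i] == '1' else 0) for i, p in enumerate(parities)]
--     return [1 - p for p in parities]
-- ===== Notes on version B (the rewrite author's own statement) =====
-- stated objective: alternative
-- what changed: B replaces A's transpose-then-count-per-column pass with a single row-major pass that XOR-accumulates a running parity per column and finally inverts it; no transposed strings or substring counting are built.
import Mathlib
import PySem

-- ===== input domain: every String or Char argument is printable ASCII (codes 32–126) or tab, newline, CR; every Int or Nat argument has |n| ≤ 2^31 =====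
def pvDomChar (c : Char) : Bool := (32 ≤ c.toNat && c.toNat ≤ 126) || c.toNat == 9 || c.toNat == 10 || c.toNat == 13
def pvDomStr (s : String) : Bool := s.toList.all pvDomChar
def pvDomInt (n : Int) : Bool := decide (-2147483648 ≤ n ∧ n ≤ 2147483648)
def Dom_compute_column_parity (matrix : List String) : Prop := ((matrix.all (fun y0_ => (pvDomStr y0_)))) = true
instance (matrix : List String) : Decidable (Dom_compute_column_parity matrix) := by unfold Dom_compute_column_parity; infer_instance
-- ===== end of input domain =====

-- B: one honest line — same O(r*c) cost, but a row-major accumulating pass (running per-column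
-- parity flipped by XOR) instead of A's transpose-and-count-per-column; return value only.
-- ===== PORT A =====
def compute_column_parity (matrix : List String) : List Int :=
  let transposed : List (List Char) :=
    (PySem.List.pyRange 0 (PySem.Str.len (PySem.List.pyGetD matrix 0 ""))).map
      (fun i => PySem.Chars.join [] (matrix.map (fun row => [PySem.List.pyGetD row.toList i ' '])))
  transposed.foldl (fun acc column =>
      let count_of_ones : Nat := PySem.Chars.count column ['1']
      let parity : Int := if count_of_ones % 2 == 0 then 1 else 0
      acc ++ [parity]) []

-- ===== PORT B =====
def compute_column_parity_alt (matrix : List String) : List Int :=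
  let n : Int := PySem.Str.len (PySem.List.pyGetD matrix 0 "")
  let parities : List Int := matrix.foldl
    (fun ps row => (PySem.List.enumerate ps).map
        (fun ip => PySem.Int.bxor ip.2 (if PySem.List.pyGetD row.toList ip.1 ' ' == '1' then 1 else 0)))
    (List.replicate n.toNat (0 : Int))
  parities.map (fun p => 1 - p)

-- ===== PRECONDITION & SPEC =====
-- Pre_ excludes exactly the inputs on which the Python A raises IndexError: the empty matrix
-- (matrix[0]) and ragged matrices where some row is shorter than the first row (row[i]).
def Pre_compute_column_parity (matrix : List String) : Prop :=
  matrix ≠ [] ∧ ∀ s ∈ matrix, (matrix.headD "").toList.length ≤ s.toList.length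
instance (matrix : List String) : Decidable (Pre_compute_column_parity matrix) := by
  unfold Pre_compute_column_parity; infer_instance
def pvWitness_compute_column_parity : List String := ["101", "011"]
def Spec_compute_column_parity (matrix : List String) (out : List Int) : Prop := out = compute_column_parity_alt matrix
instance (matrix : List String) (out : List Int) : Decidable (Spec_compute_column_parity matrix out) := by unfold Spec_compute_column_parity; infer_instance

-- ===== CLAIM (what is proved, stated in full; the proofs are below) =====
def Claim_equal_compute_column_parity : Prop := ∀ (matrix : List String), Dom_compute_column_parity matrix → Pre_compute_column_parity matrix → Spec_compute_column_parity matrix (compute_column_parity matrix)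

-- ===== LEMMAS AND PROOFS =====

-- str.count with a single-character needle is List.count (fuel-indexed go of PySem.Chars.count).
theorem pvGoSingle (c : Char) : ∀ (fuel : Nat) (cs : List Char) (acc : Nat), cs.length ≤ fuel →
    PySem.Chars.count.go [c] fuel cs acc = acc + cs.count c := by
  intro fuel
  induction fuel with
  | zero => intro cs acc h; cases cs <;> simp_all [PySem.Chars.count.go]
  | succ n ih =>
    intro cs acc h
    cases cs with
    | nil => simp [PySem.Chars.count.go]
    | cons d ds =>
      simp only [PySem.Chars.count.go, List.isPrefixOf, List.length] at *
      by_cases hc : c = d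
      · subst hc
        simp only [BEq.rfl, Bool.true_and, if_true]
        have hd : List.drop (0 + 1) (c :: ds) = ds := by simp
        rw [hd, ih ds (acc + 1) (by omega), List.count_cons]
        simp; omega
      · have hbe : (c == d) = false := by simp [hc]
        simp only [hbe, Bool.false_and]
        rw [if_neg (by simp), ih ds acc (by omega), List.count_cons]
        simp [Ne.symm hc]

theorem pvCountSingle (cs : List Char) (c : Char) : PySem.Chars.count cs [c] = cs.count c := by
  simp [PySem.Chars.count, pvGoSingle c cs.length cs 0 le_rfl]

-- one row step of B on a list presented as (List.range n).map g
theorem pvEnumMapRange {n : Nat} (g : Nat → Int) (F : Int × Int → Int) :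
    (PySem.List.enumerate ((List.range n).map g)).map F
      = (List.range n).map (fun (k : Nat) => F ((k : Int), g k)) := by
  rw [PySem.List.enumerate_eq_map_pyRange _ 0]
  have hlen : PySem.List.len ((List.range n).map g) = (n : Int) := by
    simp [PySem.List.len]
  rw [hlen, PySem.List.pyRange_zero_natCast, List.map_map, List.map_map]
  refine List.map_congr_left (fun k hk => ?_)
  have hk' : k < n := List.mem_range.mp hk
  simp [PySem.List.pyGetD_natCast, List.getD, hk']

-- XOR of two bits given as n % 2 casts
theorem pvBxorBit (a b : Nat) :
    PySem.Int.bxor ((a % 2 : Nat) : Int) ((b % 2 : Nat) : Int) = (((a + b) % 2 : Nat) : Int) := by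
  rcases Nat.mod_two_eq_zero_or_one a with ha | ha <;>
    rcases Nat.mod_two_eq_zero_or_one b with hb | hb <;> rw [ha, hb]
  · have h : (a + b) % 2 = 0 := by omega
    rw [h]; decide
  · have h : (a + b) % 2 = 1 := by omega
    rw [h]; decide
  · have h : (a + b) % 2 = 1 := by omega
    rw [h]; decide
  · have h : (a + b) % 2 = 0 := by omega
    rw [h]; decide

-- a fold of XOR-flips over {0,1} values counts mod 2
theorem pvFoldBxor (p : String → Bool) (rows : List String) : ∀ (s : Nat),
    rows.foldl (fun a row => PySem.Int.bxor a (if p row then 1 else 0)) ((s % 2 : Nat) : Int)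
      = (((s + rows.countP p) % 2 : Nat) : Int) := by
  induction rows with
  | nil => intro s; simp
  | cons r rs ih =>
    intro s
    simp only [List.foldl_cons, List.countP_cons]
    by_cases hp : p r
    · rw [show (if p r then (1 : Int) else 0) = ((1 % 2 : Nat) : Int) by simp [hp]]
      rw [pvBxorBit s 1, ih (s + 1)]
      simp only [hp, if_true]
      congr 1; omega
    · rw [show (if p r then (1 : Int) else 0) = ((0 % 2 : Nat) : Int) by simp [hp]]
      rw [pvBxorBit s 0, ih (s + 0)]
      simp [hp]

-- B's row fold keeps the shape (List.range n).map …, accumulating per-column XOR folds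
theorem pvRowsFold (rows : List String) : ∀ (n : Nat) (g : Nat → Int),
    rows.foldl
      (fun ps row => (PySem.List.enumerate ps).map
        (fun ip => PySem.Int.bxor ip.2 (if PySem.List.pyGetD row.toList ip.1 ' ' == '1' then 1 else 0)))
      ((List.range n).map g)
    = (List.range n).map (fun (k : Nat) =>
        rows.foldl (fun a row =>
          PySem.Int.bxor a (if PySem.List.pyGetD row.toList (k : Int) ' ' == '1' then 1 else 0)) (g k)) := by
  induction rows with
  | nil => intro n g; simp
  | cons r rs ih =>
    intro n g
    simp only [List.foldl_cons]
    rw [pvEnumMapRange g, ih n]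

-- A in normal form: one parity value per column index
theorem pvA_eq (matrix : List String) :
    compute_column_parity matrix
      = (List.range (PySem.List.pyGetD matrix 0 "").toList.length).map (fun (k : Nat) =>
          if (matrix.countP (fun row => PySem.List.pyGetD row.toList (k : Int) ' ' == '1')) % 2 == 0
          then (1 : Int) else 0) := by
  simp only [compute_column_parity]
  rw [show PySem.Str.len (PySem.List.pyGetD matrix 0 "")
      = ((PySem.List.pyGetD matrix 0 "").toList.length : Int) by simp [PySem.Str.len_eq]]
  rw [PySem.List.pyRange_zero_natCast, List.map_map,
    PySem.List.foldl_append_singleton_eq_map, List.nil_append, List.map_map]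
  refine List.map_congr_left (fun k _ => ?_)
  simp only [Function.comp]
  have hjoin : PySem.Chars.join []
      (matrix.map (fun row => [PySem.List.pyGetD row.toList (k : Int) ' '])) =
      matrix.map (fun row => PySem.List.pyGetD row.toList (k : Int) ' ') := by
    rw [show (matrix.map (fun row => [PySem.List.pyGetD row.toList (k : Int) ' ']))
        = (matrix.map (fun row => PySem.List.pyGetD row.toList (k : Int) ' ')).map (fun c => [c]) by
      simp [List.map_map, Function.comp]]
    exact PySem.Chars.join_nil_singletons _
  simp only [hjoin, pvCountSingle, List.count_eq_countP, List.countP_map]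
  rfl

-- B in normal form
theorem pvB_eq (matrix : List String) :
    compute_column_parity_alt matrix
      = (List.range (PySem.List.pyGetD matrix 0 "").toList.length).map (fun (k : Nat) =>
          1 - (((matrix.countP (fun row => PySem.List.pyGetD row.toList (k : Int) ' ' == '1')) % 2 : Nat) : Int)) := by
  simp only [compute_column_parity_alt]
  rw [show PySem.Str.len (PySem.List.pyGetD matrix 0 "")
      = ((PySem.List.pyGetD matrix 0 "").toList.length : Int) by simp [PySem.Str.len_eq]]
  rw [show List.replicate (((PySem.List.pyGetD matrix 0 "").toList.length : Int)).toNat (0 : Int)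
      = (List.range (PySem.List.pyGetD matrix 0 "").toList.length).map
          (fun (_ : Nat) => ((0 % 2 : Nat) : Int)) by
    simp [List.map_const']]
  rw [pvRowsFold, List.map_map]
  refine List.map_congr_left (fun k _ => ?_)
  simp only [Function.comp]
  rw [pvFoldBxor (fun row => PySem.List.pyGetD row.toList (k : Int) ' ' == '1') matrix 0]
  simp

-- ===== VERDICT (by name: the statement is the Claim_ definition above) =====
theorem compute_column_parity_spec : Claim_equal_compute_column_parity := by
  intro matrix _ _
  unfold Spec_compute_column_parity
  rw [pvA_eq, pvB_eq]
  refine List.map_congr_left (fun k _ => ?_)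
  rcases Nat.mod_two_eq_zero_or_one
      (matrix.countP (fun row => PySem.List.pyGetD row.toList (k : Int) ' ' == '1')) with h | h <;>
    rw [h] <;> simp
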